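-- pv_equiv track=rewrite | github.com/rafaelperazzo/programacao-web | moodledata/vpl_data/46/usersdata/137/18594/submittedfiles/funcoes1.py | decrescente
-- ===== SOURCE A (Python) =====
-- def decrescente (a):
--     cont=0
--     for i in range (0,len(a)-1,1):
--         if a[i]>a[i+1]:
--             cont=cont+1
--     if cont!=0:
--         return True
--     else:
--         return False
-- ===== SOURCE B (Python) =====
-- def decrescente(a):
--     return list(a) != sorted(a)
-- ===== Notes on version B (the rewrite author's own statement) =====
-- stated objective: simpler
-- what changed: Replaced the indexed adjacent-pair counting loop by a single 'is it already sorted?' comparison: list(a) != sorted(a).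
import Mathlib
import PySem

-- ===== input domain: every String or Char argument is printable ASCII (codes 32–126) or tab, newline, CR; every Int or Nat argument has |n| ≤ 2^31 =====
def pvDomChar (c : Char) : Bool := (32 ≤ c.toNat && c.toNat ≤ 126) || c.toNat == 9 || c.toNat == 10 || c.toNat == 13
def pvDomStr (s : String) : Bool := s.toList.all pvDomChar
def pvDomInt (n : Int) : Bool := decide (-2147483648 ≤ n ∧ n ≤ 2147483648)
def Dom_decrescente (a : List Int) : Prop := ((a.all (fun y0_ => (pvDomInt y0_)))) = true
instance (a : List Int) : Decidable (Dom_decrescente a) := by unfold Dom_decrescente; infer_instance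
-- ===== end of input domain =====

-- B replaces A's adjacent-pair counting loop by the single comparison list(a) != sorted(a) (simpler; not faster).


-- ===== PORT A =====
def decrescente (a : List Int) : Bool :=
  let cont : Int := (PySem.List.pyRange 0 ((a.length : Int) - 1) 1).foldl
    (fun cont i =>
      if PySem.List.pyGetD a i 0 > PySem.List.pyGetD a (i + 1) 0 then cont + 1 else cont) 0
  if cont ≠ 0 then true else false

-- ===== PORT B =====
def decrescente_alt (a : List Int) : Bool :=
  !(a == PySem.List.sorted a (fun x => x) false)

-- ===== PRECONDITION & SPEC =====
def Spec_decrescente (a : List Int) (out : Bool) : Prop := out = decrescente_alt a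
instance (a : List Int) (out : Bool) : Decidable (Spec_decrescente a out) := by unfold Spec_decrescente; infer_instance

-- ===== CLAIM (what is proved, stated in full; the proofs are below) =====
def Claim_equal_decrescente : Prop := ∀ (a : List Int), Dom_decrescente a → Spec_decrescente a (decrescente a)

-- ===== LEMMAS AND PROOFS =====

-- counting foldl is countP
theorem pv_foldl_count (p : Int → Prop) [DecidablePred p] (l : List Int) (c : Int) :
    l.foldl (fun c i => if p i then c + 1 else c) c = c + (l.countP (fun i => decide (p i)) : Int) := by
  induction l generalizing c with
  | nil => simp
  | cons x xs ih =>
    simp only [List.foldl_cons, List.countP_cons, ih]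
    by_cases h : p x
    · simp [h]
      push_cast
      ring
    · simp [h]

-- A returns true iff some adjacent pair descends
theorem pv_A_iff (a : List Int) :
    decrescente a = true ↔ ∃ k : Nat, k + 1 < a.length ∧ a.getD (k + 1) 0 < a.getD k 0 := by
  unfold decrescente
  rw [pv_foldl_count (fun i => PySem.List.pyGetD a i 0 > PySem.List.pyGetD a (i + 1) 0)]
  simp only [zero_add]
  split_ifs with hc
  · simp only [true_iff]
    have hpos : 0 < (PySem.List.pyRange 0 ((a.length : Int) - 1) 1).countP
        (fun i => decide (PySem.List.pyGetD a i 0 > PySem.List.pyGetD a (i + 1) 0)) := by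
      omega
    obtain ⟨i, hi, hp⟩ := List.countP_pos_iff.mp hpos
    rw [PySem.List.mem_pyRange_one] at hi
    refine ⟨i.toNat, by omega, ?_⟩
    simp only [decide_eq_true_eq, gt_iff_lt] at hp
    rw [PySem.List.pyGetD_eq_getElem a (i := i) 0 (by omega) (by omega),
        PySem.List.pyGetD_eq_getElem a (i := i + 1) 0 (by omega) (by omega)] at hp
    have he : (i + 1).toNat = i.toNat + 1 := by omega
    simp only [he] at hp
    rw [List.getD_eq_getElem a 0 (n := i.toNat + 1) (by omega),
        List.getD_eq_getElem a 0 (n := i.toNat) (by omega)]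
    exact hp
  · simp only [false_iff, not_exists, not_and, not_lt]
    intro k hk
    by_contra hlt
    push_neg at hlt
    have hmem : (k : Int) ∈ PySem.List.pyRange 0 ((a.length : Int) - 1) 1 := by
      rw [PySem.List.mem_pyRange_one]
      constructor
      · omega
      · omega
    have hp : decide (PySem.List.pyGetD a (k : Int) 0 > PySem.List.pyGetD a ((k : Int) + 1) 0) = true := by
      simp only [decide_eq_true_eq, gt_iff_lt]
      rw [PySem.List.pyGetD_eq_getElem a (i := (k : Int)) 0 (by omega) (by omega),
          PySem.List.pyGetD_eq_getElem a (i := (k : Int) + 1) 0 (by omega) (by omega)]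
      have h1 : ((k : Int)).toNat = k := by omega
      have h2 : ((k : Int) + 1).toNat = k + 1 := by omega
      simp only [h1, h2]
      rw [List.getD_eq_getElem a 0 (n := k + 1) (by omega),
          List.getD_eq_getElem a 0 (n := k) (by omega)] at hlt
      exact hlt
    have hpos : 0 < (PySem.List.pyRange 0 ((a.length : Int) - 1) 1).countP
        (fun i => decide (PySem.List.pyGetD a i 0 > PySem.List.pyGetD a (i + 1) 0)) :=
      List.countP_pos_iff.mpr ⟨(k : Int), hmem, hp⟩
    omega

-- no adjacent descent iff Pairwise (≤)
theorem pv_pairwise_iff (a : List Int) :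
    a.Pairwise (· ≤ ·) ↔ ∀ k : Nat, k + 1 < a.length → a.getD k 0 ≤ a.getD (k + 1) 0 := by
  rw [List.pairwise_iff_getElem]
  constructor
  · intro h k hk
    rw [List.getD_eq_getElem a 0 (n := k) (by omega),
        List.getD_eq_getElem a 0 (n := k + 1) (by omega)]
    exact h k (k + 1) (by omega) hk (by omega)
  · intro h i j hi hj hij
    have aux : ∀ m n : Nat, m < n → n < a.length → a.getD m 0 ≤ a.getD n 0 := by
      intro m n hmn
      induction n, hmn using Nat.le_induction with
      | base => intro hn; exact h m hn
      | succ n hmn ih =>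
        intro hn
        exact le_trans (ih (by omega)) (h n hn)
    have := aux i j hij hj
    rwa [List.getD_eq_getElem a 0 hi, List.getD_eq_getElem a 0 hj] at this

-- B returns true iff not sorted ascending
theorem pv_B_iff (a : List Int) :
    decrescente_alt a = true ↔ ¬ a.Pairwise (· ≤ ·) := by
  unfold decrescente_alt
  simp only [Bool.not_eq_eq_eq_not, Bool.not_true, beq_eq_false_iff_ne, ne_eq]
  constructor
  · intro h hp
    exact h (PySem.List.sorted_eq_self_of_pairwise a (fun x => x) hp).symm
  · intro h heq
    exact h (by rw [heq]; exact PySem.List.sorted_pairwise a (fun x => x))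

-- ===== VERDICT (by name: the statement is the Claim_ definition above) =====
theorem decrescente_spec : Claim_equal_decrescente := by
  intro a _
  unfold Spec_decrescente
  rw [Bool.eq_iff_iff, pv_A_iff, pv_B_iff, pv_pairwise_iff]
  push_neg
  constructor
  · rintro ⟨k, hk, hd⟩
    exact ⟨k, hk, hd⟩
  · rintro ⟨k, hk, hd⟩
    exact ⟨k, hk, hd⟩
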